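-- pv_equiv track=rewrite | github.com/ApelsinDev/FSIS_tk_Astashin_Zhuravlev_Senkevich | labs123/lab3.py | generate_x_vectors
-- ===== SOURCE A (Python) =====
-- def generate_x_vectors(n, k):
--     vectors = []
--     vector = [0] * (n - k)
--     while len(vectors) < k:
--         for i in reversed(range(len(vector))):
--             if vector[i] == 0:
--                 vector[i] = 1
--                 vectors.append(vector[:])
--                 break
--             else:
--                 vector[i] = 0
--     return vectors
-- ===== SOURCE B (Python) =====
-- def generate_x_vectors(n, k):
--     if k <= 0:
--         return []
--     m = n - k
--     period = 2 ** m - 1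
--     return [[(j % period + 1) >> (m - 1 - i) & 1 for i in range(m)] for j in range(k)]
-- ===== Notes on version B (the rewrite author's own statement) =====
-- stated objective: alternative
-- what changed: Replaces the stateful bit-list counter (mutate-in-place ripple increment inside a while loop) by a closed-form comprehension: the j-th output vector is the big-endian (n-k)-bit decomposition of (j mod (2^(n-k)-1)) + 1, computed arithmetically per index.
import Mathlib
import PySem

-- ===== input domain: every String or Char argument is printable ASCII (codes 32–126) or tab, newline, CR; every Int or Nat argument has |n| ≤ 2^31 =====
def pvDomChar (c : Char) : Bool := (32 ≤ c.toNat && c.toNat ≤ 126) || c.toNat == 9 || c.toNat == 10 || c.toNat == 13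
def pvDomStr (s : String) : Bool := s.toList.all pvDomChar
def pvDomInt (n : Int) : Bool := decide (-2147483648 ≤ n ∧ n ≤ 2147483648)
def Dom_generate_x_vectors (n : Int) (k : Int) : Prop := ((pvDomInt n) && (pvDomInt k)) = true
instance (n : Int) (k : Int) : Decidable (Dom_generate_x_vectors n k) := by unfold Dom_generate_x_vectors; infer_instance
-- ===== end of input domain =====

-- B replaces A's stateful ripple-carry bit-list counter by a closed-form comprehension
-- (j-th vector = big-endian bits of (j mod (2^(n-k)-1)) + 1); objective: alternative.

-- ===== PORT A =====
-- The 'for i in reversed(range(len(vector)))' with early break, transcribed as structural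
-- recursion over the reversed vector (same visit order, same branches); returns the updated
-- (still reversed) vector and whether a copy was appended (the break branch).
def pvIncRev : List Int → List Int × Bool
  | [] => ([], false)
  | b :: rest =>
    if b = 0 then (1 :: rest, true)
    else
      let (r, f) := pvIncRev rest
      ((0 : Int) :: r, f)

-- the 'while len(vectors) < k' loop, with fuel (A diverges when k ≥ 1 and n - k ≤ 0;
-- Pre_ excludes that, and 2*k+2 iterations always suffice otherwise)
def pvWhileA (k : Int) : Nat → List (List Int) → List Int → List (List Int)
  | 0, vectors, _ => vectors
  | fuel + 1, vectors, vector =>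
    if (vectors.length : Int) < k then
      match pvIncRev vector.reverse with
      | (rv, true) => pvWhileA k fuel (vectors ++ [rv.reverse]) rv.reverse
      | (rv, false) => pvWhileA k fuel vectors rv.reverse
    else vectors

def generate_x_vectors (n : Int) (k : Int) : List (List Int) :=
  pvWhileA k (2 * k.toNat + 2) [] (List.replicate (n - k).toNat 0)

-- ===== PORT B =====
def generate_x_vectors_alt (n : Int) (k : Int) : List (List Int) :=
  if k ≤ 0 then []
  else
    let m := n - k
    let period : Int := 2 ^ m.toNat - 1
    (PySem.List.pyRange 0 k 1).map (fun j =>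
      (PySem.List.pyRange 0 m 1).map (fun i =>
        -- (j % period + 1) >> (m - 1 - i) & 1 ; the shift count m-1-i is ≥ 0 for every
        -- i in range(m), so .toNat is exact there
        PySem.Int.band ((PySem.Int.mod j period + 1) >>> (m - 1 - i).toNat) 1))

-- ===== PRECONDITION & SPEC =====
-- A returns iff k ≤ 0 (no iteration) or n - k ≥ 1 (a nonempty bit vector); otherwise the
-- while loop never appends and A spins forever, so those inputs are outside Pre_.
def Pre_generate_x_vectors (n : Int) (k : Int) : Prop := k ≤ 0 ∨ 1 ≤ n - k
instance (n : Int) (k : Int) : Decidable (Pre_generate_x_vectors n k) := by unfold Pre_generate_x_vectors; infer_instance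
def pvWitness_generate_x_vectors : Int × Int := (5, 3)

def Spec_generate_x_vectors (n : Int) (k : Int) (out : List (List Int)) : Prop := out = generate_x_vectors_alt n k
instance (n : Int) (k : Int) (out : List (List Int)) : Decidable (Spec_generate_x_vectors n k out) := by unfold Spec_generate_x_vectors; infer_instance

-- ===== CLAIM (what is proved, stated in full; the proofs are below) =====
def Claim_equal_generate_x_vectors : Prop := ∀ (n : Int) (k : Int), Dom_generate_x_vectors n k → Pre_generate_x_vectors n k → Spec_generate_x_vectors n k (generate_x_vectors n k)

-- ===== LEMMAS AND PROOFS =====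

-- little-endian M-bit encoding of v
def pvEnc : Nat → Nat → List Int
  | 0, _ => []
  | m + 1, v => ((v % 2 : Nat) : Int) :: pvEnc m (v / 2)

@[simp] lemma pvEnc_length (M v : Nat) : (pvEnc M v).length = M := by
  induction M generalizing v with
  | zero => rfl
  | succ m ih => simp [pvEnc, ih]

lemma pvEnc_zero (M : Nat) : pvEnc M 0 = List.replicate M 0 := by
  induction M with
  | zero => rfl
  | succ m ih => simp [pvEnc, ih, List.replicate_succ]

lemma pvIncRev_lt (M v : Nat) (h : v + 1 < 2 ^ M) :
    pvIncRev (pvEnc M v) = (pvEnc M (v + 1), true) := by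
  induction M generalizing v with
  | zero => simp at h
  | succ m ih =>
    by_cases he : v % 2 = 0
    · have h1 : (v + 1) % 2 = 1 := by omega
      have h2 : (v + 1) / 2 = v / 2 := by omega
      simp [pvEnc, pvIncRev, he, h1, h2]
    · have he1 : v % 2 = 1 := by omega
      have hlt : v / 2 + 1 < 2 ^ m := by
        have : (2:Nat) ^ (m+1) = 2 * 2 ^ m := by ring
        omega
      have h1 : (v + 1) % 2 = 0 := by omega
      have h2 : (v + 1) / 2 = v / 2 + 1 := by omega
      simp [pvEnc, pvIncRev, he1, ih _ hlt, h1, h2]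

lemma pvIncRev_all (M : Nat) :
    pvIncRev (pvEnc M (2 ^ M - 1)) = (pvEnc M 0, false) := by
  induction M with
  | zero => simp [pvEnc, pvIncRev]
  | succ m ih =>
    have hp : (2:Nat) ^ (m+1) = 2 * 2 ^ m := by ring
    have hpos : 0 < (2:Nat) ^ m := Nat.two_pow_pos m
    have h1 : (2 ^ (m+1) - 1) % 2 = 1 := by omega
    have h2 : (2 ^ (m+1) - 1) / 2 = 2 ^ m - 1 := by omega
    simp [pvEnc, pvIncRev, h1, h2, ih]

lemma pvEnc_getElem (M v i : Nat) (h : i < M) :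
    (pvEnc M v)[i]'(by simpa using h) = ((v / 2 ^ i % 2 : Nat) : Int) := by
  induction M generalizing v i with
  | zero => omega
  | succ m ih =>
    cases i with
    | zero => simp [pvEnc]
    | succ j =>
      have := ih (v / 2) j (by omega)
      simpa [pvEnc, Nat.div_div_eq_div_mul, pow_succ, mul_comm] using this

lemma pvEnc_rev (M w : Nat) :
    (pvEnc M w).reverse = (List.range M).map (fun i => ((w / 2 ^ (M - 1 - i) % 2 : Nat) : Int)) := by
  apply List.ext_getElem
  · simp
  · intro i h1 h2
    simp only [List.getElem_reverse, List.getElem_map, List.getElem_range]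
    have hi : i < M := by simpa using h2
    rw [pvEnc_getElem M w ((pvEnc M w).length - 1 - i) (by simp only [pvEnc_length]; omega)]
    simp

-- the while-loop invariant: the counter equals (#appended so far) mod (2^M - 1)
lemma pvTailShift (P M ℓ r : Nat) :
    List.map (fun t => (pvEnc M ((ℓ + t) % P + 1)).reverse) (List.range (r + 1))
      = (pvEnc M (ℓ % P + 1)).reverse
        :: List.map (fun t => (pvEnc M ((ℓ + 1 + t) % P + 1)).reverse) (List.range r) := by
  rw [List.range_succ_eq_map, List.map_cons, List.map_map]
  simp only [Nat.add_zero]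
  congr 1
  apply List.map_congr_left
  intro t _
  simp only [Function.comp_apply, Nat.add_succ, Nat.succ_add]

lemma pvWhileA_spec (k : Int) (M : Nat) (hM : 1 ≤ M) :
    ∀ (r fuel : Nat) (vectors : List (List Int)),
      2 * r + 1 ≤ fuel → (vectors.length : Int) + r = k →
      pvWhileA k fuel vectors (pvEnc M (vectors.length % (2 ^ M - 1))).reverse
        = vectors ++ (List.range r).map
            (fun t => (pvEnc M ((vectors.length + t) % (2 ^ M - 1) + 1)).reverse) := by
  intro r
  have hpos : 1 ≤ (2:Nat) ^ M - 1 := by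
    have : (2:Nat) ^ 1 ≤ 2 ^ M := Nat.pow_le_pow_right (by norm_num) hM
    simp at this; omega
  induction r with
  | zero =>
    intro fuel vectors hfuel hlen
    obtain ⟨f, rfl⟩ : ∃ f, fuel = f + 1 := ⟨fuel - 1, by omega⟩
    have : ¬ ((vectors.length : Int) < k) := by omega
    simp [pvWhileA, this]
  | succ r ih =>
    intro fuel vectors hfuel hlen
    obtain ⟨f, rfl⟩ : ∃ f, fuel = f + 1 := ⟨fuel - 1, by omega⟩
    set P := (2:Nat) ^ M - 1 with hP
    set ℓ := vectors.length with hℓ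
    have hcond : (vectors.length : Int) < k := by push_cast at hlen; omega
    have hv : ℓ % P < P := Nat.mod_lt _ (by omega)
    have hstep : pvIncRev (pvEnc M (ℓ % P)) = (pvEnc M (ℓ % P + 1), true) :=
      pvIncRev_lt M _ (by omega)
    rw [show pvWhileA k (f+1) vectors (pvEnc M (ℓ % P)).reverse
          = pvWhileA k f (vectors ++ [(pvEnc M (ℓ % P + 1)).reverse]) (pvEnc M (ℓ % P + 1)).reverse by
        simp [pvWhileA, hcond, List.reverse_reverse, hstep]]
    rw [pvTailShift P M ℓ r]
    by_cases hwrap : ℓ % P + 1 < P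
    · -- normal step: the new counter is (ℓ+1) % P
      have hmod : (ℓ + 1) % P = ℓ % P + 1 := by
        rw [Nat.add_mod, Nat.mod_eq_of_lt (show 1 < P by omega), Nat.mod_eq_of_lt hwrap]
      have hIH := ih f (vectors ++ [(pvEnc M (ℓ % P + 1)).reverse]) (by omega)
        (by simp; push_cast at hlen ⊢; omega)
      simp only [List.length_append, List.length_cons, List.length_nil, Nat.zero_add] at hIH
      rw [show vectors.length + 1 = ℓ + 1 from rfl, hmod] at hIH
      rw [hIH, List.append_assoc, List.singleton_append]
    · -- the appended value is all-ones: the next iteration wraps the counter to 0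
      have hsat : ℓ % P + 1 = P := by omega
      cases r with
      | zero =>
        obtain ⟨f', rfl⟩ : ∃ f', f = f' + 1 := ⟨f - 1, by omega⟩
        have hstop : ¬ ((vectors.length : Int) + 1 < k) := by push_cast at hlen; omega
        simp [pvWhileA, hstop]
      | succ r' =>
        obtain ⟨f', rfl⟩ : ∃ f', f = f' + 1 := ⟨f - 1, by omega⟩
        have hcond2 : (vectors.length : Int) + 1 < k := by push_cast at hlen; omega
        have hall : pvIncRev (pvEnc M (ℓ % P + 1)) = (pvEnc M 0, false) := by
          rw [hsat, hP]; exact pvIncRev_all M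
        rw [show pvWhileA k (f'+1) (vectors ++ [(pvEnc M (ℓ % P + 1)).reverse]) (pvEnc M (ℓ % P + 1)).reverse
              = pvWhileA k f' (vectors ++ [(pvEnc M (ℓ % P + 1)).reverse]) (pvEnc M 0).reverse by
            simp [pvWhileA, hcond2, List.reverse_reverse, hall]]
        have hmod : (ℓ + 1) % P = 0 := by
          rcases Nat.lt_or_ge 1 P with hlt | hge
          · rw [Nat.add_mod, Nat.mod_eq_of_lt hlt, hsat, Nat.mod_self]
          · have hP1 : P = 1 := by omega
            simp [hP1, Nat.mod_one]
        have hIH := ih f' (vectors ++ [(pvEnc M (ℓ % P + 1)).reverse]) (by omega)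
          (by simp; push_cast at hlen ⊢; omega)
        simp only [List.length_append, List.length_cons, List.length_nil, Nat.zero_add] at hIH
        rw [show vectors.length + 1 = ℓ + 1 from rfl, hmod] at hIH
        rw [hIH, List.append_assoc, List.singleton_append]

-- ===== VERDICT (by name: the statement is the Claim_ definition above) =====
theorem generate_x_vectors_spec : Claim_equal_generate_x_vectors := by
  intro n k _ hpre
  unfold Spec_generate_x_vectors generate_x_vectors generate_x_vectors_alt
  by_cases hk : k ≤ 0
  · have h0 : k.toNat = 0 := by omega
    simp [h0, pvWhileA, hk]
  · have hm : 1 ≤ n - k := by rcases hpre with h | h <;> omega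
    have hk1 : 1 ≤ k := by omega
    set M := (n - k).toNat with hM
    have hM1 : 1 ≤ M := by omega
    set P := (2:Nat) ^ M - 1 with hP
    have hpos : 1 ≤ P := by
      have : (2:Nat) ^ 1 ≤ 2 ^ M := Nat.pow_le_pow_right (by norm_num) hM1
      simp at this; omega
    have hinit : List.replicate M (0:Int) = (pvEnc M (([] : List (List Int)).length % P)).reverse := by
      simp [pvEnc_zero, List.reverse_replicate]
    rw [hinit]
    rw [pvWhileA_spec k M hM1 k.toNat (2 * k.toNat + 2) [] (by omega) (by simp; omega)]
    simp only [List.nil_append, List.length_nil, Nat.zero_add]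
    rw [if_neg hk, PySem.List.pyRange_one 0 k]
    simp only [List.map_map, Int.sub_zero]
    apply List.map_congr_left
    intro t ht
    have hnk : (M : Int) = n - k := by rw [hM]; exact Int.toNat_of_nonneg (by omega)
    have h2M : 1 ≤ (2:Nat) ^ M := Nat.one_le_two_pow
    have hPcast : ((2:Int) ^ (n - k).toNat - 1) = ((P : Nat) : Int) := by
      rw [hP, ← hM]; push_cast [h2M]; ring
    simp only [Function.comp_apply, zero_add]
    rw [hPcast, PySem.Int.mod_natCast,
      show ((t % P : Nat) : Int) + 1 = ((t % P + 1 : Nat) : Int) by push_cast; ring]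
    rw [pvEnc_rev M (t % P + 1), PySem.List.pyRange_one 0 (n - k)]
    simp only [List.map_map, Int.sub_zero, ← hnk, Int.toNat_natCast]
    apply List.map_congr_left
    intro i hi
    have hi' : i < M := List.mem_range.mp hi
    have hexp : ((M:Int) - 1 - (i:Int)).toNat = M - 1 - i := by omega
    simp only [Function.comp_apply, zero_add, hexp]
    rw [show ((t % P + 1 : Nat) : Int) >>> (M - 1 - i) = ((t % P + 1) >>> (M - 1 - i) : Nat) by
        exact Int.natCast_shiftRight _ _,
      PySem.Int.band_one, show (2:Int) = ((2:Nat):Int) from rfl, PySem.Int.mod_natCast,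
      Nat.shiftRight_eq_div_pow]
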